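-- pv_equiv track=rewrite | github.com/CocoRoF/Contextifier | contextifier_new/handlers/rtf/_table_parser.py | _group_rows_into_tables
-- ===== SOURCE A (Python) =====
-- from typing import Dict, List, NamedTuple, Optional, Tuple
--
-- _ROW_GAP_THRESHOLD = 150
--
-- def _group_rows_into_tables(
--     raw_rows: List[Tuple[int, int, str]],
-- ) -> List[Tuple[int, int, List[str]]]:
--     """
--     Group consecutive rows into tables.
--
--     Rows that are within ``_ROW_GAP_THRESHOLD`` characters
--     of each other belong to the same table.
--
--     Returns:
--         List of (start_pos, end_pos, list_of_row_texts).
--     """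
--     groups: List[Tuple[int, int, List[str]]] = []
--     current_texts: List[str] = []
--     current_start = -1
--     current_end = -1
--     prev_end = -1
--
--     for row_start, row_end, row_text in raw_rows:
--         if prev_end == -1 or (row_start - prev_end) < _ROW_GAP_THRESHOLD:
--             if current_start == -1:
--                 current_start = row_start
--             current_texts.append(row_text)
--             current_end = row_end
--         else:
--             if current_texts:
--                 groups.append((current_start, current_end, current_texts))
--             current_texts = [row_text]
--             current_start = row_start
--             current_end = row_end
--         prev_end = row_end
--
--     if current_texts:
--         groups.append((current_start, current_end, current_texts))
--
--     return groups
-- ===== SOURCE B (Python) =====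
-- _ROW_GAP_THRESHOLD = 150
--
--
-- def _group_rows_into_tables(raw_rows):
--     """Staged decomposition: find all cut indices first, then slice.
--
--     Pass 1 scans adjacent row pairs and records every index i at which a new
--     table starts (the gap from the previous row's end is >= the threshold).
--     Pass 2 slices raw_rows at those indices and summarises each slice as
--     (start of first row, end of last row, the row texts).
--     """
--     if not raw_rows:
--         return []
--     n = len(raw_rows)
--     cuts = [i for i in range(1, n)
--             if raw_rows[i][0] - raw_rows[i - 1][1] >= _ROW_GAP_THRESHOLD]
--     bounds = [0] + cuts + [n]
--     tables = []
--     for a, b in zip(bounds, bounds[1:]):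
--         seg = raw_rows[a:b]
--         tables.append((seg[0][0], seg[-1][1], [r[2] for r in seg]))
--     return tables
-- ===== Notes on version B (the rewrite author's own statement) =====
-- stated objective: alternative
-- what changed: Replaced A's single stateful fold (five mutable variables with -1 sentinels and a trailing flush) with a staged index computation: pass 1 collects the cut indices from adjacent row pairs, pass 2 slices raw_rows at those cuts and summarises each slice.
import Mathlib
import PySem

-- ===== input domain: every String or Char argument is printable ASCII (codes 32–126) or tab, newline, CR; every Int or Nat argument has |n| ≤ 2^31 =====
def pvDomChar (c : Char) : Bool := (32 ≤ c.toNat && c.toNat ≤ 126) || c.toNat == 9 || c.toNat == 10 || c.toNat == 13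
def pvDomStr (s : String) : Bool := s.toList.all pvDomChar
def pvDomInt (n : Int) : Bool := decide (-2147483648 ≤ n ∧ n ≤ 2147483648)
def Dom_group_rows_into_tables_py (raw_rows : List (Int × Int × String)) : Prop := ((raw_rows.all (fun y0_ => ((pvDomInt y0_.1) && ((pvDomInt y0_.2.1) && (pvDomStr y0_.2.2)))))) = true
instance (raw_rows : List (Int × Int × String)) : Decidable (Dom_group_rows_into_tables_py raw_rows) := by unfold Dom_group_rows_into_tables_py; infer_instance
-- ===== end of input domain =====

-- B computes the same tables in two staged passes (collect cut indices, then slice)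
-- instead of A's stateful fold; equivalence is proved outside the inputs where A's -1
-- sentinels collide with real -1 data (see Pre_ below).

-- ===== PORT A =====
-- loop body of A's `for row_start, row_end, row_text in raw_rows`, state
-- (groups, current_texts, current_start, current_end, prev_end)
def aStep (st : List (Int × Int × List String) × List String × Int × Int × Int)
    (row : Int × Int × String) : List (Int × Int × List String) × List String × Int × Int × Int :=
  let (groups, current_texts, current_start, current_end, prev_end) := st
  let (row_start, row_end, row_text) := row
  if prev_end = -1 ∨ row_start - prev_end < 150 then
    let current_start := if current_start = -1 then row_start else current_start
    (groups, current_texts ++ [row_text], current_start, row_end, row_end)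
  else
    (groups ++ [(current_start, current_end, current_texts)], [row_text], row_start, row_end, row_end)

def group_rows_into_tables_py (raw_rows : List (Int × Int × String)) : List (Int × Int × List String) :=
  let st := raw_rows.foldl aStep ([], [], -1, -1, -1)
  let (groups, current_texts, current_start, current_end, _) := st
  if current_texts ≠ [] then groups ++ [(current_start, current_end, current_texts)] else groups

-- ===== PORT B =====
-- B's cut test at index i; wherever B applies it, i and i-1 are in range, so
-- `getD` is exactly Python's raw_rows[i] / raw_rows[i-1]
def bBreak (raw_rows : List (Int × Int × String)) (i : Nat) : Bool :=
  decide (150 ≤ (raw_rows.getD i default).1 - (raw_rows.getD (i - 1) default).2.1)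

-- raw_rows[a:b] with 0 ≤ a ≤ b ≤ n is exactly (drop a).take (b-a); seg[0]/seg[-1]
-- on the nonempty slice are exactly headD/getLastD
def group_rows_into_tables_py_alt (raw_rows : List (Int × Int × String)) :
    List (Int × Int × List String) :=
  if raw_rows = [] then []
  else
    let n := raw_rows.length
    let cuts := (List.range' 1 (n - 1)).filter (bBreak raw_rows)
    let bounds := 0 :: cuts ++ [n]
    (bounds.zip (bounds.drop 1)).map (fun ab =>
      let seg := (raw_rows.drop ab.1).take (ab.2 - ab.1)
      ((seg.headD default).1, (seg.getLastD default).2.1, seg.map (fun r => r.2.2)))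

-- ===== PRECONDITION & SPEC =====
-- Pre_ excludes exactly the inputs on which A's use of -1 as its "no previous row / no
-- current group start" sentinel collides with -1 occurring as real data: a row whose end
-- is -1 followed by a row starting at least the threshold away (A force-merges it as if
-- no row preceded), and a group-opening row whose start is -1 that a following row merges
-- into (A overwrites the group start with that row's start); both are artefacts of A's
-- state encoding that B does not reproduce.
-- okRows pe rows: checked along consecutive rows, pe = end of the preceding row (none at the head)
def okRows (pe : Option Int) (rows : List (Int × Int × String)) : Bool :=
  match rows with
  | [] => true
  | (s, e, _) :: rs =>
    (decide (e = -1 → ∀ r ∈ rs.head?, r.1 ≤ 148)) &&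
    (decide ((s = -1 ∧ (∀ p ∈ pe, p ≠ -1 ∧ s - p ≥ 150)) →
        ∀ r ∈ rs.head?, ¬(e = -1 ∨ r.1 - e < 150))) &&
    okRows (some e) rs

def Pre_group_rows_into_tables_py (raw_rows : List (Int × Int × String)) : Prop :=
  okRows none raw_rows = true
instance (raw_rows : List (Int × Int × String)) : Decidable (Pre_group_rows_into_tables_py raw_rows) := by unfold Pre_group_rows_into_tables_py; infer_instance

def pvWitness_group_rows_into_tables_py : (List (Int × Int × String)) :=
  [(0, 10, "a"), (40, 60, "b"), (300, 320, "c")]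

def Spec_group_rows_into_tables_py (raw_rows : List (Int × Int × String)) (out : List (Int × Int × List String)) : Prop := out = group_rows_into_tables_py_alt raw_rows
instance (raw_rows : List (Int × Int × String)) (out : List (Int × Int × List String)) : Decidable (Spec_group_rows_into_tables_py raw_rows out) := by unfold Spec_group_rows_into_tables_py; infer_instance

-- ===== CLAIM (what is proved, stated in full; the proofs are below) =====
def Claim_equal_group_rows_into_tables_py : Prop := ∀ (raw_rows : List (Int × Int × String)), Dom_group_rows_into_tables_py raw_rows → Pre_group_rows_into_tables_py raw_rows → Spec_group_rows_into_tables_py raw_rows (group_rows_into_tables_py raw_rows)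

-- ===== LEMMAS AND PROOFS =====

-- Common reference form: recursive grouping, the bridge between A's fold and B's slices.
def gInner (e : Int) (texts : List String) (rest : List (Int × Int × String)) :
    Int × List String × List (Int × Int × String) :=
  match rest with
  | [] => (e, texts, [])
  | (s, e', t) :: rs =>
    if s - e < 150 then gInner e' (texts ++ [t]) rs
    else (e, texts, (s, e', t) :: rs)

theorem gInner_rem_le (e : Int) (texts : List String) (rest : List (Int × Int × String)) :
    (gInner e texts rest).2.2.length ≤ rest.length := by
  induction rest generalizing e texts with
  | nil => simp [gInner]
  | cons r rs ih =>
    obtain ⟨s, e', t⟩ := r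
    simp only [gInner]
    split
    · exact le_trans (ih e' (texts ++ [t])) (Nat.le_succ _)
    · simp

def gRun (rows : List (Int × Int × String)) : List (Int × Int × List String) :=
  match rows with
  | [] => []
  | (s, e, t) :: rs =>
    let r := gInner e [t] rs
    (s, r.1, r.2.1) :: gRun r.2.2
termination_by rows.length
decreasing_by
  simp only [List.length_cons]
  exact Nat.lt_succ_of_le (gInner_rem_le e [t] rs)


-- A's final flush applied to a mid-loop state
def aFinish (st : List (Int × Int × List String) × List String × Int × Int × Int) :
    List (Int × Int × List String) :=
  let (groups, current_texts, current_start, current_end, _) := st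
  if current_texts ≠ [] then groups ++ [(current_start, current_end, current_texts)] else groups

-- Loop invariant for A: after at least one row, A's prev_end equals current_end,
-- current_texts is nonempty, and (h2) whenever current_start is still -1 the next row
-- does not merge; under okRows from the current position, the rest of A's fold yields
-- the group gInner closes plus the gRun groups of the remainder.
theorem fold_eq (rows : List (Int × Int × String))
    (groups : List (Int × Int × List String)) (texts : List String) (cs ce : Int)
    (hok : okRows (some ce) rows = true)
    (htexts : texts ≠ [])
    (h1 : ce = -1 → ∀ r ∈ rows.head?, r.1 ≤ 148)
    (h2 : cs = -1 → ∀ r ∈ rows.head?, ¬(ce = -1 ∨ r.1 - ce < 150)) :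
    aFinish (rows.foldl aStep (groups, texts, cs, ce, ce)) =
      groups ++ (cs, (gInner ce texts rows).1, (gInner ce texts rows).2.1) ::
        gRun (gInner ce texts rows).2.2 := by
  induction rows generalizing groups texts cs ce with
  | nil => simp [gInner, aFinish, gRun, htexts]
  | cons r rs ih =>
    obtain ⟨s, e, t⟩ := r
    simp only [okRows, Bool.and_eq_true, decide_eq_true_eq] at hok
    obtain ⟨⟨hA, hB⟩, hok'⟩ := hok
    by_cases hmerge : s - ce < 150
    · -- both A and B absorb the row into the current group
      have hcond : ce = -1 ∨ s - ce < 150 := Or.inr hmerge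
      have hcs : cs ≠ -1 := by
        intro h
        exact h2 h (s, e, t) (by simp) hcond
      have hstep : aStep (groups, texts, cs, ce, ce) (s, e, t)
          = (groups, texts ++ [t], cs, e, e) := by
        simp [aStep, hcond, hcs]
      rw [List.foldl_cons, hstep,
        ih groups (texts ++ [t]) cs e hok' (by simp) hA (fun h => absurd h hcs)]
      simp [gInner, hmerge]
    · -- A splits here (its prev_end = ce is not -1 on Pre_): so does B
      have hce : ce ≠ -1 := by
        intro h
        have hs : s ≤ 148 := h1 h (s, e, t) (by simp)
        omega
      have hcond : ¬(ce = -1 ∨ s - ce < 150) := by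
        intro h; rcases h with h | h
        · exact hce h
        · exact hmerge h
      have hstep : aStep (groups, texts, cs, ce, ce) (s, e, t)
          = (groups ++ [(cs, ce, texts)], [t], s, e, e) := by
        simp only [aStep, if_neg hcond]
      have h2' : s = -1 → ∀ r ∈ rs.head?, ¬(e = -1 ∨ r.1 - e < 150) := by
        intro hs
        exact hB ⟨hs, by intro p hp; simp at hp; subst hp; exact ⟨hce, by omega⟩⟩
      rw [List.foldl_cons, hstep,
        ih (groups ++ [(cs, ce, texts)]) [t] s e hok' (by simp) hA h2']
      simp only [gInner, if_neg hmerge]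
      rw [gRun]
      simp

-- A = gRun on Pre_
theorem A_eq_gRun (rows : List (Int × Int × String))
    (hpre : okRows none rows = true) :
    group_rows_into_tables_py rows = gRun rows := by
  match rows with
  | [] => simp [group_rows_into_tables_py, gRun]
  | (s, e, t) :: rs =>
    simp only [okRows, Bool.and_eq_true, decide_eq_true_eq] at hpre
    obtain ⟨⟨hA, hB⟩, hok'⟩ := hpre
    have hstep : aStep ([], [], -1, -1, -1) (s, e, t) = ([], [t], s, e, e) := by
      simp [aStep]
    have h2 : s = -1 → ∀ r ∈ rs.head?, ¬(e = -1 ∨ r.1 - e < 150) := by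
      intro hs
      exact hB ⟨hs, by intro p hp; simp at hp⟩
    have hmain : aFinish (rs.foldl aStep ([], [t], s, e, e))
        = [] ++ (s, (gInner e [t] rs).1, (gInner e [t] rs).2.1) ::
            gRun (gInner e [t] rs).2.2 :=
      fold_eq rs [] [t] s e hok' (by simp) hA h2
    have : group_rows_into_tables_py ((s, e, t) :: rs)
        = aFinish (rs.foldl aStep ([], [t], s, e, e)) := by
      simp only [group_rows_into_tables_py, List.foldl_cons, hstep, aFinish]
    rw [this, hmain, gRun]
    simp

-- ---- B-side: cut indices, bound pairs, slices ----
def brkQ (p q : Int × Int × String) : Bool := decide (150 ≤ q.1 - p.2.1)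

def cutsOf (l : List (Int × Int × String)) : List Nat :=
  (List.range' 1 (l.length - 1)).filter (bBreak l)

def segFun (l : List (Int × Int × String)) (ab : Nat × Nat) : Int × Int × List String :=
  let seg := (l.drop ab.1).take (ab.2 - ab.1)
  ((seg.headD default).1, (seg.getLastD default).2.1, seg.map (fun r => r.2.2))

def pairsOf (l : List Nat) : List (Nat × Nat) := l.zip (l.drop 1)

theorem alt_eq (l : List (Int × Int × String)) (h : l ≠ []) :
    group_rows_into_tables_py_alt l
      = (pairsOf (0 :: cutsOf l ++ [l.length])).map (segFun l) := by
  simp [group_rows_into_tables_py_alt, h, cutsOf, pairsOf, segFun]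

theorem bBreak_cons (x : Int × Int × String) (l : List (Int × Int × String)) (i : Nat)
    (hi : 1 ≤ i) : bBreak (x :: l) (i + 1) = bBreak l i := by
  cases i with
  | zero => omega
  | succ j => simp [bBreak, List.getD]

theorem bBreak_one (x q : Int × Int × String) (rs : List (Int × Int × String)) :
    bBreak (x :: q :: rs) 1 = brkQ x q := by
  simp [bBreak, brkQ]

theorem filter_range'_shift (x : Int × Int × String) (l : List (Int × Int × String))
    (m s : Nat) (hs : 1 ≤ s) :
    (List.range' (s + 1) m).filter (bBreak (x :: l))
      = ((List.range' s m).filter (bBreak l)).map (· + 1) := by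
  induction m generalizing s with
  | zero => simp
  | succ m ih =>
    rw [List.range'_succ, List.range'_succ, List.filter_cons, List.filter_cons,
      bBreak_cons x l s hs, ih (s + 1) (by omega)]
    split <;> simp

theorem cuts_cons (x q : Int × Int × String) (rs : List (Int × Int × String)) :
    cutsOf (x :: q :: rs)
      = (if brkQ x q then [1] else []) ++ (cutsOf (q :: rs)).map (· + 1) := by
  have hlen : (x :: q :: rs).length - 1 = ((q :: rs).length - 1) + 1 := by simp
  rw [cutsOf, hlen, List.range'_succ, List.filter_cons, bBreak_one,
    filter_range'_shift x (q :: rs) _ 1 le_rfl]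
  rcases Bool.eq_false_or_eq_true (brkQ x q) with hb | hb <;>
    simp [hb, cutsOf]

theorem cuts_cons_true (x q : Int × Int × String) (rs : List (Int × Int × String))
    (hb : brkQ x q = true) :
    cutsOf (x :: q :: rs) = 1 :: (cutsOf (q :: rs)).map (· + 1) := by
  simp [cuts_cons, hb]

theorem cuts_cons_false (x q : Int × Int × String) (rs : List (Int × Int × String))
    (hb : brkQ x q = false) :
    cutsOf (x :: q :: rs) = (cutsOf (q :: rs)).map (· + 1) := by
  simp [cuts_cons, hb]

theorem cuts_mem_pos (l : List (Int × Int × String)) (k : Nat) (hk : k ∈ cutsOf l) :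
    1 ≤ k := by
  rw [cutsOf, List.mem_filter] at hk
  have := List.mem_range'_1.mp hk.1
  omega

theorem pairs_map_succ (t : List Nat) :
    pairsOf (t.map (· + 1)) = (pairsOf t).map (fun p => (p.1 + 1, p.2 + 1)) := by
  unfold pairsOf
  rw [← List.map_drop, List.zip_map]
  rfl

theorem pairsOf_cons (a b : Nat) (l : List Nat) :
    pairsOf (a :: b :: l) = (a, b) :: pairsOf (b :: l) := rfl

theorem segFun_shift (x : Int × Int × String) (l : List (Int × Int × String))
    (a b : Nat) : segFun (x :: l) (a + 1, b + 1) = segFun l (a, b) := by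
  simp [segFun]

-- merging one row onto the head group
def mergeHead (x : Int × Int × String) (gs : List (Int × Int × List String)) :
    List (Int × Int × List String) :=
  match gs with
  | [] => []
  | g :: gs => (x.1, g.2.1, x.2.2 :: g.2.2) :: gs

theorem map_shift_seg (x : Int × Int × String) (l : List (Int × Int × String))
    (t : List Nat) :
    ((pairsOf (t.map (· + 1))).map (segFun (x :: l))) = (pairsOf t).map (segFun l) := by
  rw [pairs_map_succ, List.map_map]
  exact List.map_congr_left (fun p _ => segFun_shift x l p.1 p.2)

theorem alt_break (x q : Int × Int × String) (rs : List (Int × Int × String))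
    (hb : brkQ x q = true) :
    group_rows_into_tables_py_alt (x :: q :: rs)
      = (x.1, x.2.1, [x.2.2]) :: group_rows_into_tables_py_alt (q :: rs) := by
  rw [alt_eq _ (by simp), alt_eq _ (by simp), cuts_cons_true x q rs hb]
  simp only [List.cons_append]
  rw [pairsOf_cons, List.map_cons]
  have h1 : (1 : Nat) :: ((cutsOf (q :: rs)).map (· + 1) ++ [(x :: q :: rs).length])
      = ((0 : Nat) :: (cutsOf (q :: rs) ++ [(q :: rs).length])).map (· + 1) := by simp
  rw [h1, map_shift_seg]
  congr 1

theorem alt_merge (x q : Int × Int × String) (rs : List (Int × Int × String))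
    (hb : brkQ x q = false) :
    group_rows_into_tables_py_alt (x :: q :: rs)
      = mergeHead x (group_rows_into_tables_py_alt (q :: rs)) := by
  rw [alt_eq _ (by simp), alt_eq _ (by simp), cuts_cons_false x q rs hb]
  simp only [List.cons_append]
  cases hc : cutsOf (q :: rs) with
  | nil =>
    simp only [List.map_nil, List.nil_append]
    have hp1 : pairsOf (0 :: [(x :: q :: rs).length]) = [(0, (x :: q :: rs).length)] := rfl
    have hp2 : pairsOf (0 :: [(q :: rs).length]) = [(0, (q :: rs).length)] := rfl
    rw [hp1, hp2]
    simp [segFun, mergeHead]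
  | cons k c =>
    have hk : 1 ≤ k := cuts_mem_pos _ k (by rw [hc]; simp)
    obtain ⟨k', rfl⟩ : ∃ k', k = k' + 1 := ⟨k - 1, by omega⟩
    simp only [List.map_cons, List.cons_append]
    rw [pairsOf_cons, pairsOf_cons, List.map_cons, List.map_cons]
    have h1 : ((k' + 1 : Nat) + 1) :: ((c.map (· + 1)) ++ [(x :: q :: rs).length])
        = (((k' + 1 : Nat)) :: (c ++ [(q :: rs).length])).map (· + 1) := by simp
    rw [h1, map_shift_seg]
    simp only [mergeHead]
    congr 1

-- gRun satisfies the same two-case recursion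
theorem gInner_prepend (e : Int) (pre ts : List String) (rs : List (Int × Int × String)) :
    gInner e (pre ++ ts) rs
      = ((gInner e ts rs).1, pre ++ (gInner e ts rs).2.1, (gInner e ts rs).2.2) := by
  induction rs generalizing e ts with
  | nil => simp [gInner]
  | cons r rs ih =>
    obtain ⟨s, e', t⟩ := r
    simp only [gInner]
    split
    · rw [List.append_assoc]; exact ih e' (ts ++ [t])
    · rfl

theorem gRun_break (x q : Int × Int × String) (rs : List (Int × Int × String))
    (hb : brkQ x q = true) :
    gRun (x :: q :: rs) = (x.1, x.2.1, [x.2.2]) :: gRun (q :: rs) := by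
  obtain ⟨s, e, t⟩ := x
  obtain ⟨s', e', t'⟩ := q
  simp only [brkQ, decide_eq_true_eq] at hb
  rw [gRun]
  simp [gInner, show ¬(s' - e < 150) by omega]

theorem gRun_merge (x q : Int × Int × String) (rs : List (Int × Int × String))
    (hb : brkQ x q = false) :
    gRun (x :: q :: rs) = mergeHead x (gRun (q :: rs)) := by
  obtain ⟨s, e, t⟩ := x
  obtain ⟨s', e', t'⟩ := q
  simp only [brkQ, decide_eq_false_iff_not] at hb
  rw [gRun, gRun]
  have hg : gInner e [t] ((s', e', t') :: rs) = gInner e' ([t] ++ [t']) rs := by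
    simp [gInner, show s' - e < 150 by omega]
  rw [hg, gInner_prepend e' [t] [t'] rs]
  simp [mergeHead]

-- B = gRun on all inputs
theorem alt_eq_gRun (rows : List (Int × Int × String)) :
    group_rows_into_tables_py_alt rows = gRun rows := by
  induction rows with
  | nil => simp [group_rows_into_tables_py_alt, gRun]
  | cons x rest ih =>
    cases rest with
    | nil =>
      obtain ⟨s, e, t⟩ := x
      rw [alt_eq _ (by simp), gRun]
      simp [cutsOf, pairsOf, segFun, gInner, gRun]
    | cons q rs =>
      cases hb : brkQ x q with
      | false => rw [alt_merge x q rs hb, gRun_merge x q rs hb, ih]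
      | true => rw [alt_break x q rs hb, gRun_break x q rs hb, ih]


-- ===== VERDICT (by name: the statement is the Claim_ definition above) =====
theorem group_rows_into_tables_py_spec : Claim_equal_group_rows_into_tables_py := by
  intro raw_rows _ hpre
  unfold Spec_group_rows_into_tables_py
  rw [A_eq_gRun raw_rows hpre, alt_eq_gRun]
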